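-- pv_equiv track=rewrite | github.com/tzw0745/HackSecretCipher | source/SubCipher.py | get_word_pattern
-- ===== SOURCE A (Python) =====
-- def get_word_pattern(word):
--     """
--     获取单词的模式，代表单词字母顺序
--     :param word: APPLE模式为12234
--     :return: 数字模式
--     """
--     char_map = {}
--     pattern = []
--     n = 1
--     for ch in word:
--         if ch not in char_map:
--             char_map[ch] = n
--             n += 1
--         pattern.append(str(char_map[ch]))
--
--     return '.'.join(pattern)
-- ===== SOURCE B (Python) =====
-- def get_word_pattern(word):
--     """
--     获取单词的模式，代表单词字母顺序
--     :param word: APPLE模式为12234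
--     :return: 数字模式
--     """
--     return '.'.join(str(len(set(word[:word.index(c) + 1]))) for c in word)
-- ===== Notes on version B (the rewrite author's own statement) =====
-- stated objective: simpler
-- what changed: Drops the dict/counter entirely: each character's number is recomputed independently as the count of distinct characters in the prefix ending at that character's first occurrence (len(set(word[:word.index(c)+1]))), joined in one expression; this trades A's linear single pass for a plainer quadratic one-liner.
import Mathlib
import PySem

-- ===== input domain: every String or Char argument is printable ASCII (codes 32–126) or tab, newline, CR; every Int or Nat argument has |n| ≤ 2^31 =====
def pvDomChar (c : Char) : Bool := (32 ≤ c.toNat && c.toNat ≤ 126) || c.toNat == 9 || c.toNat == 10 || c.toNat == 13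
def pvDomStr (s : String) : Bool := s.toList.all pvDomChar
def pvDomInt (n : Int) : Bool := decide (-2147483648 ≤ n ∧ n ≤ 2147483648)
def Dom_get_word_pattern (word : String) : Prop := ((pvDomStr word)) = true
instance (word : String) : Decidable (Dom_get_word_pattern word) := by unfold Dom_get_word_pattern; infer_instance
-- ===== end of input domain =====

-- B is simpler (a one-liner with no dict or counter): each character's number is recomputed
-- independently as len(set(word[:word.index(c)+1])); quadratic instead of A's linear pass.

-- ===== PORT A =====
-- one loop iteration of A: possibly register ch in char_map with the next number n,
-- then append str(char_map[ch]) to the pattern (state = (char_map, pattern, n))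
def pvStepA (s : PySem.Dict Char Int × List (List Char) × Int) (ch : Char) :
    PySem.Dict Char Int × List (List Char) × Int :=
  let s' := if s.1.contains ch then s else (s.1.insert ch s.2.2, s.2.1, s.2.2 + 1)
  (s'.1, s'.2.1 ++ [PySem.Int.toChars (s'.1.getD ch 0)], s'.2.2)

def get_word_pattern (word : String) : String :=
  let st := word.toList.foldl pvStepA (PySem.Dict.empty, ([] : List (List Char)), (1 : Int))
  String.ofList (PySem.Chars.join ['.'] st.2.1)

-- ===== PORT B =====
-- str(len(set(word[:word.index(c) + 1]))) for one character c of word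
def pvNumB (l : List Char) (c : Char) : List Char :=
  PySem.Int.toChars
    ((PySem.Set.ofList
        (PySem.List.slice l none
          (some ((((PySem.List.index? l c).getD 0 : Nat) : Int) + 1)))).length : Int)

-- '.'.join(str(len(set(word[:word.index(c) + 1]))) for c in word)
def get_word_pattern_alt (word : String) : String :=
  String.ofList (PySem.Chars.join ['.'] (word.toList.map (pvNumB word.toList)))

-- ===== PRECONDITION & SPEC =====
def Spec_get_word_pattern (word : String) (out : String) : Prop := out = get_word_pattern_alt word
instance (word : String) (out : String) : Decidable (Spec_get_word_pattern word out) := by unfold Spec_get_word_pattern; infer_instance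

-- ===== CLAIM (what is proved, stated in full; the proofs are below) =====
def Claim_equal_get_word_pattern : Prop := ∀ (word : String), Dom_get_word_pattern word → Spec_get_word_pattern word (get_word_pattern word)

-- ===== LEMMAS AND PROOFS =====

-- helper name for A's loop characterisation: the rank table A builds
def pvRanks (l : List Char) : PySem.Dict Char Int :=
  (PySem.List.enumerate (PySem.List.dedup l) 0).foldl
    (fun d p => d.insert p.2 (p.1 + 1)) PySem.Dict.empty

-- lookup in the dict built by inserting (value i+1) along 'enumerate xs s', for nodup keys
theorem pv_get?_foldl_enumerate (xs : List Char) (s : Int) (d0 : PySem.Dict Char Int)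
    (hnd : xs.Nodup) (c : Char) :
    ((PySem.List.enumerate xs s).foldl (fun d p => d.insert p.2 (p.1 + 1)) d0).get? c
      = if c ∈ xs then some (s + (xs.idxOf c : Int) + 1) else d0.get? c := by
  induction xs generalizing s d0 with
  | nil => simp [PySem.List.enumerate_nil]
  | cons x xs ih =>
    rw [PySem.List.enumerate_cons]
    simp only [List.foldl_cons]
    rcases List.nodup_cons.mp hnd with ⟨hx, hxs⟩
    rw [ih (s + 1) _ hxs]
    by_cases hc : c ∈ xs
    · have hne : c ≠ x := fun h => hx (h ▸ hc)
      simp [hc, hne, List.idxOf_cons_ne _ (by simpa using (Ne.symm hne))]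
      ring
    · by_cases hcx : c = x
      · subst hcx
        simp [hc, PySem.Dict.get?_insert_self, List.idxOf_cons_self]
      · simp [hc, hcx, PySem.Dict.get?_insert_of_ne _ _ hcx]

-- the rank dict looks up to (index in dedup) + 1; 0-default outside
theorem pv_ranks_getD (l : List Char) (c : Char) :
    (pvRanks l).getD c 0
      = if c ∈ l then ((PySem.List.dedup l).idxOf c : Int) + 1 else 0 := by
  unfold pvRanks
  rw [PySem.Dict.getD_eq_get?_getD,
    pv_get?_foldl_enumerate _ _ _ (by simp [PySem.Set.nodup_ofList]) c]
  by_cases hc : c ∈ l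
  · simp [hc]
  · simp [hc, PySem.Dict.get?_empty]

-- membership test of A's char_map = membership in the word prefix
theorem pv_ranks_contains (l : List Char) (c : Char) :
    (pvRanks l).contains c = decide (c ∈ l) := by
  rw [PySem.Dict.contains_eq_isSome_get?]
  unfold pvRanks
  rw [pv_get?_foldl_enumerate _ _ _ (by simp [PySem.Set.nodup_ofList]) c]
  by_cases hc : c ∈ l <;> simp [hc, PySem.Dict.get?_empty]

-- the characterising invariant of A's loop
theorem pv_foldA (l : List Char) :
    l.foldl pvStepA (PySem.Dict.empty, ([] : List (List Char)), (1 : Int))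
      = (pvRanks l,
         l.map (fun c => PySem.Int.toChars ((pvRanks l).getD c 0)),
         ((PySem.List.dedup l).length : Int) + 1) := by
  induction l using List.reverseRecOn with
  | nil => rfl
  | append_singleton t x ih =>
    rw [List.foldl_append, ih, List.foldl_cons, List.foldl_nil]
    by_cases hx : x ∈ t
    · have hded : PySem.List.dedup (t ++ [x]) = PySem.List.dedup t := by
        simp only [PySem.List.dedup_eq_ofList, PySem.Set.ofList_append_singleton]
        exact PySem.Set.add_of_mem (by simp [PySem.Set.mem_ofList, hx])
      have hR : pvRanks (t ++ [x]) = pvRanks t := by unfold pvRanks; rw [hded]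
      simp [pvStepA, pv_ranks_contains, hx, hR]
      exact congrArg List.length (by simpa using hded.symm)
    · have hded : PySem.List.dedup (t ++ [x]) = PySem.List.dedup t ++ [x] := by
        simp only [PySem.List.dedup_eq_ofList, PySem.Set.ofList_append_singleton]
        exact PySem.Set.add_of_not_mem (by simpa [PySem.Set.mem_ofList] using hx)
      have hR : pvRanks (t ++ [x])
          = (pvRanks t).insert x (((PySem.List.dedup t).length : Int) + 1) := by
        unfold pvRanks
        rw [hded, PySem.List.enumerate_append, List.foldl_append,
          PySem.List.enumerate_cons, PySem.List.enumerate_nil]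
        simp
      have hgx : (pvRanks (t ++ [x])).getD x 0
          = ((PySem.List.dedup t).length : Int) + 1 := by
        rw [hR, PySem.Dict.getD_insert_self]
      have hmap : ∀ c ∈ t, PySem.Int.toChars ((pvRanks (t ++ [x])).getD c 0)
          = PySem.Int.toChars ((pvRanks t).getD c 0) := by
        intro c hc
        have hcd : c ∈ PySem.List.dedup t := by simp [PySem.Set.mem_ofList, hc]
        rw [pv_ranks_getD, pv_ranks_getD, if_pos hc, if_pos (List.mem_append_left _ hc),
          hded, List.idxOf_append_of_mem hcd]
      simp only [pvStepA, pv_ranks_contains, hx, decide_false, Bool.false_eq_true,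
        if_false, Prod.mk.injEq]
      refine ⟨hR.symm, ?_, ?_⟩
      · rw [List.map_append, List.map_cons, List.map_nil, PySem.Dict.getD_insert_self, hgx,
          List.map_congr_left hmap]
      · rw [hded]; simp only [List.length_append, List.length_cons, List.length_nil]; push_cast; ring

-- ofList of a prefix is a prefix of ofList
theorem pv_ofList_prefix (p t : List Char) :
    PySem.Set.ofList p <+: PySem.Set.ofList (p ++ t) := by
  induction t using List.reverseRecOn with
  | nil => simp
  | append_singleton u x ih =>
    rw [← List.append_assoc, PySem.Set.ofList_append_singleton]
    refine ih.trans ?_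
    by_cases hx : x ∈ PySem.Set.ofList (p ++ u)
    · rw [PySem.Set.add_of_mem hx]
    · rw [PySem.Set.add_of_not_mem hx]; exact List.prefix_append _ _

-- nothing before the first occurrence of c is c
theorem pv_not_mem_take_idxOf (l : List Char) (c : Char) : c ∉ l.take (l.idxOf c) := by
  induction l with
  | nil => simp
  | cons x xs ih =>
    by_cases hx : x = c
    · subst hx; simp [List.idxOf_cons_self]
    · rw [List.idxOf_cons_ne _ (by simpa using hx), List.take_succ_cons]
      simp [ih]
      exact fun h => hx h.symm

-- idxOf? at a member is some idxOf
theorem pv_idxOf?_eq_some (l : List Char) (c : Char) (h : c ∈ l) :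
    l.idxOf? c = some (l.idxOf c) := by
  simp only [List.idxOf?_eq_some_iff]
  refine ⟨List.idxOf_lt_length_of_mem h, List.getElem_idxOf (List.idxOf_lt_length_of_mem h),
    fun j hj hje => ?_⟩
  have hjl : j < l.length := hj.trans (List.idxOf_lt_length_of_mem h)
  have : l[j] ∈ l.take (l.idxOf c) := by
    have : (l.take (l.idxOf c))[j]'(by simp [hjl, hj]) = l[j] := List.getElem_take
    exact this ▸ List.getElem_mem _
  exact absurd (hje ▸ this) (pv_not_mem_take_idxOf l c)

-- idxOf over an append where c first appears right after the prefix
theorem pv_idxOf_append (q r : List Char) (c : Char) (h : c ∉ q) :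
    (q ++ c :: r).idxOf c = q.length := by
  induction q with
  | nil => simp [List.idxOf_cons_self]
  | cons x xs ih =>
    simp only [List.mem_cons, not_or] at h
    rw [List.cons_append, List.idxOf_cons_ne _ (by simpa using (Ne.symm h.1)), ih h.2]
    simp

-- B's prefix distinct-count equals A's rank: (index in dedup) + 1
theorem pv_len_prefix (l : List Char) (c : Char) (h : c ∈ l) :
    (PySem.Set.ofList (l.take (l.idxOf c + 1))).length
      = (PySem.List.dedup l).idxOf c + 1 := by
  have hlt := List.idxOf_lt_length_of_mem h
  have htake : l.take (l.idxOf c + 1) = l.take (l.idxOf c) ++ [c] := by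
    rw [List.take_add_one]
    simp [List.getElem?_eq_getElem hlt, List.getElem_idxOf]
  have hnm : c ∉ PySem.Set.ofList (l.take (l.idxOf c)) := by
    simpa [PySem.Set.mem_ofList] using pv_not_mem_take_idxOf l c
  have hof : PySem.Set.ofList (l.take (l.idxOf c + 1))
      = PySem.Set.ofList (l.take (l.idxOf c)) ++ [c] := by
    rw [htake, PySem.Set.ofList_append_singleton, PySem.Set.add_of_not_mem hnm]
  have hpre : PySem.Set.ofList (l.take (l.idxOf c + 1)) <+: PySem.Set.ofList l := by
    have := pv_ofList_prefix (l.take (l.idxOf c + 1)) (l.drop (l.idxOf c + 1))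
    rwa [List.take_append_drop] at this
  rcases hpre with ⟨r, hr⟩
  rw [hof, List.append_assoc, List.singleton_append] at hr
  rw [PySem.List.dedup_eq_ofList, ← hr, pv_idxOf_append _ _ _ hnm, hof]
  simp

-- B's per-character string = A's rank string, for c ∈ l
theorem pv_numB_eq (l : List Char) (c : Char) (h : c ∈ l) :
    pvNumB l c = PySem.Int.toChars (((PySem.List.dedup l).idxOf c : Int) + 1) := by
  unfold pvNumB
  have hidx : PySem.List.index? l c = some (l.idxOf c) := by
    rw [PySem.List.index?_eq_idxOf?, pv_idxOf?_eq_some l c h]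
  rw [hidx]
  have hcast : (((l.idxOf c : Nat) : Int) + 1) = (((l.idxOf c + 1 : Nat)) : Int) := by push_cast; ring
  rw [Option.getD_some, hcast, PySem.List.slice_to_natCast, pv_len_prefix l c h]
  push_cast
  ring_nf

-- ===== VERDICT (by name: the statement is the Claim_ definition above) =====
theorem get_word_pattern_spec : Claim_equal_get_word_pattern := by
  intro word _
  unfold Spec_get_word_pattern get_word_pattern get_word_pattern_alt
  rw [pv_foldA]
  simp only
  congr 1
  congr 1
  refine List.map_congr_left (fun c hc => ?_)
  rw [pv_numB_eq _ _ hc, pv_ranks_getD, if_pos hc]
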